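-- pv_equiv track=rewrite | github.com/yanzhenxing123/algorithms | 秋招笔试/美团/triplet_count_breakthrough.py | count_triplets_compressed_optimized
-- ===== SOURCE A (Python) =====
-- def count_triplets_compressed_optimized(arr):
--     """
--     压缩优化版本：减少内存分配，优化常数因子
--     """
--     n = len(arr)
--     count = 0
--
--     # 对于每个位置j
--     for j in range(1, n - 1):
--         aj = arr[j]
--
--         # 直接计算，避免创建临时列表
--         for i in range(j):
--             ai = arr[i]
--             if ai > aj:
--                 # 统计右边大于aj且小于ai的元素数量
--                 for k in range(j + 1, n):
--                     ak = arr[k]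
--                     if ak > aj and ak < ai:
--                         count += 1
--
--     return count
-- ===== SOURCE B (Python) =====
-- def count_triplets_compressed_optimized(arr):
--     # For each k (rightmost index), scan i from k-1 down to 0 keeping a running
--     # count m of indices j in (i, k) with arr[j] < arr[k]; whenever arr[i] > arr[k],
--     # those m middles complete triplets arr[i] > arr[k] > arr[j].  O(n^2) one pass per k.
--     n = len(arr)
--     total = 0
--     for k in range(n):
--         ak = arr[k]
--         m = 0
--         for i in range(k - 1, -1, -1):
--             ai = arr[i]
--             if ai > ak:
--                 total += m
--             if ai < ak:
--                 m += 1
--     return total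
-- ===== Notes on version B (the rewrite author's own statement) =====
-- stated objective: faster
-- what changed: Replaced A's cubic triple loop (for each j and each larger-left element i, rescan the whole right side) by a per-k backward scan that keeps a running count of middles j with arr[j] < arr[k], adding it whenever arr[i] > arr[k], removing the innermost scan entirely (O(n^2) vs O(n^3)).
import Mathlib
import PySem

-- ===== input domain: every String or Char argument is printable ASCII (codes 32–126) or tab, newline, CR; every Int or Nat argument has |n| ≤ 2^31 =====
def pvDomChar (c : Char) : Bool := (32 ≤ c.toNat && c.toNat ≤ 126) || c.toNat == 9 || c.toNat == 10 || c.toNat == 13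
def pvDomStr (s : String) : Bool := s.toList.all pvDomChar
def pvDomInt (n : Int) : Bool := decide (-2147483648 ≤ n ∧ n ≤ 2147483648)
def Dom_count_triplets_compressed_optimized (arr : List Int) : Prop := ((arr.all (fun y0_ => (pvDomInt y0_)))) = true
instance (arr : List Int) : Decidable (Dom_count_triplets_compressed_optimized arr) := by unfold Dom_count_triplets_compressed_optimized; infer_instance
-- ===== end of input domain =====

-- B replaces A's cubic triple loop by, for each k, one backward scan over i < k that keeps a
-- running count of middles j with arr[j] < arr[k]; objective: faster (a timing run measures it).

-- ===== PORT A =====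
def count_triplets_compressed_optimized (arr : List Int) : Int :=
  let n : Int := arr.length
  (PySem.List.pyRange 1 (n - 1) 1).foldl (fun count j =>
    let aj := PySem.List.pyGetD arr j 0
    (PySem.List.pyRange 0 j 1).foldl (fun count i =>
      let ai := PySem.List.pyGetD arr i 0
      if ai > aj then
        (PySem.List.pyRange (j + 1) n 1).foldl (fun count k =>
          let ak := PySem.List.pyGetD arr k 0
          if ak > aj ∧ ak < ai then count + 1 else count) count
      else count) count) 0

-- ===== PORT B =====
def count_triplets_compressed_optimized_alt (arr : List Int) : Int :=
  let n : Int := arr.length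
  (PySem.List.pyRange 0 n 1).foldl (fun total k =>
    let ak := PySem.List.pyGetD arr k 0
    let tm := (PySem.List.pyRange (k - 1) (-1) (-1)).foldl (fun (tm : Int × Int) i =>
      let ai := PySem.List.pyGetD arr i 0
      let t := if ai > ak then tm.1 + tm.2 else tm.1
      let m := if ai < ak then tm.2 + 1 else tm.2
      (t, m)) (total, 0)
    tm.1) 0

-- ===== PRECONDITION & SPEC =====
def Spec_count_triplets_compressed_optimized (arr : List Int) (out : Int) : Prop := out = count_triplets_compressed_optimized_alt arr
instance (arr : List Int) (out : Int) : Decidable (Spec_count_triplets_compressed_optimized arr out) := by unfold Spec_count_triplets_compressed_optimized; infer_instance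

-- ===== CLAIM (what is proved, stated in full; the proofs are below) =====
def Claim_equal_count_triplets_compressed_optimized : Prop := ∀ (arr : List Int), Dom_count_triplets_compressed_optimized arr → Spec_count_triplets_compressed_optimized arr (count_triplets_compressed_optimized arr)

-- ===== LEMMAS AND PROOFS =====

def aN (arr : List Int) (t : Nat) : Int := arr.getD t 0

def F (arr : List Int) (i j k : Nat) : Int :=
  if aN arr j < aN arr k ∧ aN arr k < aN arr i then 1 else 0

def W (arr : List Int) (c : Int) : List Int → Int
  | [] => 0
  | i :: L => (if PySem.List.pyGetD arr i 0 < c then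
      ((L.countP (fun i' => decide (PySem.List.pyGetD arr i' 0 > c))) : Int) else 0) + W arr c L

lemma countP_range_cast (m : Nat) (q : Nat → Bool) :
    (((List.range m).countP q) : Int) = ∑ t ∈ Finset.range m, (if q t then (1:Int) else 0) := by
  induction m with
  | zero => simp
  | succ m ih =>
    rw [List.range_succ, List.countP_append, Finset.sum_range_succ, ← ih]
    simp only [List.countP_cons, List.countP_nil]
    split_ifs with h <;> simp

lemma sum_map_range_cast (m : Nat) (g : Nat → Int) :
    ((List.range m).map g).sum = ∑ t ∈ Finset.range m, g t := by
  induction m with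
  | zero => simp
  | succ m ih => rw [List.range_succ, List.map_append, List.sum_append, Finset.sum_range_succ, ih]; simp

lemma LB_inner (arr : List Int) (c : Int) (L : List Int) (t m : Int) :
    (L.foldl (fun (tm : Int × Int) i =>
      let ai := PySem.List.pyGetD arr i 0
      let t := if ai > c then tm.1 + tm.2 else tm.1
      let m := if ai < c then tm.2 + 1 else tm.2
      (t, m)) (t, m))
    = (t + m * ((L.countP (fun i' => decide (PySem.List.pyGetD arr i' 0 > c))) : Int) + W arr c L,
       m + ((L.countP (fun i' => decide (PySem.List.pyGetD arr i' 0 < c))) : Int)) := by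
  induction L generalizing t m with
  | nil => simp [W]
  | cons i L ih =>
    simp only [List.foldl_cons, List.countP_cons, W]
    rw [ih]
    by_cases h1 : PySem.List.pyGetD arr i 0 > c <;> by_cases h2 : PySem.List.pyGetD arr i 0 < c
    · exact absurd (lt_trans h2 h1) (lt_irrefl _)
    · simp only [h1, h2, if_true, if_false, decide_true, decide_false]
      push_cast; simp only [Prod.mk.injEq]; exact ⟨by ring, by ring⟩
    · simp only [h1, h2, if_true, if_false, decide_true, decide_false]
      push_cast; simp only [Prod.mk.injEq]; exact ⟨by ring, by ring⟩
    · simp only [h1, h2, if_false, decide_false]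
      push_cast; simp only [Prod.mk.injEq]; exact ⟨by ring, by ring⟩

lemma LB1 (arr : List Int) : count_triplets_compressed_optimized_alt arr
    = ((PySem.List.pyRange 0 (arr.length : Int) 1).map
        (fun k => W arr (PySem.List.pyGetD arr k 0) (PySem.List.pyRange (k - 1) (-1) (-1)))).sum := by
  unfold count_triplets_compressed_optimized_alt
  dsimp only
  rw [PySem.List.foldl_congr_mem _ _
      (fun total k => total + W arr (PySem.List.pyGetD arr k 0) (PySem.List.pyRange (k - 1) (-1) (-1))) _ ?_]
  · rw [PySem.List.foldl_add]; ring
  · intro acc k hk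
    rw [LB_inner]
    ring_nf

lemma LB2 (arr : List Int) (c : Int) (k : Nat) :
    W arr c (PySem.List.pyRange ((k : Int) - 1) (-1) (-1))
    = ∑ j ∈ Finset.range k, ∑ i ∈ Finset.range j,
        (if aN arr j < c ∧ c < aN arr i then (1 : Int) else 0) := by
  induction k with
  | zero =>
    rw [PySem.List.pyRange_neg_one_eq_nil (by omega : ((0:Nat) : Int) - 1 ≤ -1)]
    simp [W]
  | succ k ih =>
    have hcons : PySem.List.pyRange (((k+1 : Nat) : Int) - 1) (-1) (-1)
        = (k : Int) :: PySem.List.pyRange ((k : Int) - 1) (-1) (-1) := by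
      have h1 : (((k+1 : Nat) : Int) - 1) = (k : Int) := by push_cast; ring
      rw [h1, PySem.List.pyRange_neg_one_cons (by omega)]
    rw [hcons]
    simp only [W]
    rw [ih, Finset.sum_range_succ, add_comm]
    congr 1
    -- ite (arr[k] < c) (countP desc) 0 = ∑ i ∈ range k, ite (aN k < c ∧ c < aN i)
    have hcnt : (((PySem.List.pyRange ((k : Int) - 1) (-1) (-1)).countP
        (fun i' => decide (PySem.List.pyGetD arr i' 0 > c))) : Int)
        = ∑ i ∈ Finset.range k, (if c < aN arr i then (1 : Int) else 0) := by
      rw [PySem.List.pyRange_neg_one, List.countP_map]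
      have hlen : (((k : Int) - 1) - (-1)).toNat = k := by omega
      rw [hlen, countP_range_cast]
      calc ∑ t ∈ Finset.range k, (if ((fun i' => decide (PySem.List.pyGetD arr i' 0 > c)) ∘ fun t => ((k : Int) - 1) - (t : Int)) t then (1:Int) else 0)
          = ∑ t ∈ Finset.range k, (if c < aN arr (k - 1 - t) then (1:Int) else 0) := by
            refine Finset.sum_congr rfl ?_
            intro t ht
            simp only [Finset.mem_range] at ht
            have hidx : ((k : Int) - 1) - ((t : Nat) : Int) = ((k - 1 - t : Nat) : Int) := by omega
            simp only [Function.comp_def, hidx, PySem.List.pyGetD_natCast]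
            simp [aN]
        _ = ∑ i ∈ Finset.range k, (if c < aN arr i then (1:Int) else 0) :=
            Finset.sum_range_reflect (fun i => if c < aN arr i then (1:Int) else 0) k
    have hak : PySem.List.pyGetD arr ((k : Nat) : Int) 0 = aN arr k := by
      rw [PySem.List.pyGetD_natCast]; rfl
    rw [hak, hcnt]
    by_cases h : aN arr k < c
    · rw [if_pos h]
      refine Finset.sum_congr rfl ?_
      intro i hi
      by_cases h2 : c < aN arr i
      · rw [if_pos h2, if_pos ⟨h, h2⟩]
      · rw [if_neg h2, if_neg (by tauto)]
    · rw [if_neg h]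
      refine (Finset.sum_eq_zero ?_).symm
      intro i hi
      rw [if_neg (by tauto)]

lemma LB3 (arr : List Int) : count_triplets_compressed_optimized_alt arr
    = ∑ k ∈ Finset.range arr.length, ∑ j ∈ Finset.range k, ∑ i ∈ Finset.range j, F arr i j k := by
  rw [LB1, PySem.List.pyRange_one, List.map_map]
  have hlen : ((arr.length : Int) - 0).toNat = arr.length := by omega
  rw [hlen, sum_map_range_cast]
  refine Finset.sum_congr rfl ?_
  intro k hk
  simp only [Function.comp_def, zero_add]
  rw [PySem.List.pyGetD_natCast, LB2]
  refine Finset.sum_congr rfl ?_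
  intro j hj
  refine Finset.sum_congr rfl ?_
  intro i hi
  simp [F, aN]

def HI (arr : List Int) (j i : Int) : Int :=
  if PySem.List.pyGetD arr i 0 > PySem.List.pyGetD arr j 0 then
    (((PySem.List.pyRange (j+1) ((arr.length : Int)) 1).countP
      (fun k => decide (PySem.List.pyGetD arr k 0 > PySem.List.pyGetD arr j 0 ∧ PySem.List.pyGetD arr k 0 < PySem.List.pyGetD arr i 0))) : Int)
  else 0

def HA (arr : List Int) (j : Int) : Int := ((PySem.List.pyRange 0 j 1).map (HI arr j)).sum

lemma LA1 (arr : List Int) : count_triplets_compressed_optimized arr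
    = ((PySem.List.pyRange 1 ((arr.length : Int) - 1) 1).map (HA arr)).sum := by
  unfold count_triplets_compressed_optimized
  dsimp only
  rw [PySem.List.foldl_congr_mem _ _ (fun count j => count + HA arr j) _ ?_]
  · rw [PySem.List.foldl_add]; ring
  · intro acc j hj
    simp only [HA]
    rw [PySem.List.foldl_congr_mem _ _ (fun count i => count + HI arr j i) _ ?_]
    · rw [PySem.List.foldl_add]
    · intro acc2 i hi
      simp only [HI]
      by_cases h : PySem.List.pyGetD arr i 0 > PySem.List.pyGetD arr j 0
      · simp only [h, if_true, gt_iff_lt]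
        rw [PySem.List.foldl_ite_add_one]
      · simp [h]

lemma HI_eq (arr : List Int) (j i : Nat) :
    HI arr ((j : Nat) : Int) ((i : Nat) : Int)
    = ∑ k ∈ Finset.Ico (j+1) arr.length, F arr i j k := by
  unfold HI
  rw [PySem.List.pyGetD_natCast, PySem.List.pyGetD_natCast]
  have hcnt : (((PySem.List.pyRange (((j:Nat):Int)+1) ((arr.length : Int)) 1).countP
      (fun k => decide (PySem.List.pyGetD arr k 0 > arr.getD j 0 ∧ PySem.List.pyGetD arr k 0 < arr.getD i 0))) : Int)
      = ∑ k ∈ Finset.Ico (j+1) arr.length, F arr i j k := by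
    have h1 : ((j:Nat):Int) + 1 = ((j+1 : Nat) : Int) := by push_cast; ring
    rw [h1, PySem.List.pyRange_one, List.countP_map]
    have hlen : ((arr.length : Int) - ((j+1 : Nat) : Int)).toNat = arr.length - (j+1) := by omega
    rw [hlen, countP_range_cast, Finset.sum_Ico_eq_sum_range]
    refine Finset.sum_congr rfl ?_
    intro t ht
    have hidx : ((j+1 : Nat) : Int) + ((t:Nat):Int) = ((j+1+t : Nat) : Int) := by push_cast; ring
    simp only [Function.comp_def, hidx, PySem.List.pyGetD_natCast]
    simp [F, aN, List.getD]
  by_cases h : arr.getD i 0 > arr.getD j 0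
  · rw [if_pos h, hcnt]
  · rw [if_neg h]
    refine (Finset.sum_eq_zero ?_).symm
    intro k hk
    have : ¬ (aN arr j < aN arr k ∧ aN arr k < aN arr i) := by
      intro hc
      exact h (lt_trans hc.1 hc.2)
    simp [F, this]

lemma HA_eq (arr : List Int) (j : Nat) :
    HA arr ((j : Nat) : Int)
    = ∑ i ∈ Finset.range j, ∑ k ∈ Finset.Ico (j+1) arr.length, F arr i j k := by
  unfold HA
  rw [PySem.List.pyRange_one, List.map_map]
  have hlen : (((j:Nat):Int) - 0).toNat = j := by omega
  rw [hlen, sum_map_range_cast]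
  refine Finset.sum_congr rfl ?_
  intro t ht
  simp only [Function.comp_def, zero_add]
  exact HI_eq arr j t

lemma LA2 (arr : List Int) : count_triplets_compressed_optimized arr
    = ∑ j ∈ Finset.range arr.length, ∑ i ∈ Finset.range j, ∑ k ∈ Finset.Ico (j+1) arr.length, F arr i j k := by
  have hfull : count_triplets_compressed_optimized arr
      = ((PySem.List.pyRange 0 ((arr.length : Int)) 1).map (HA arr)).sum := by
    rw [LA1]
    have hHA0 : HA arr 0 = 0 := by
      unfold HA
      rw [PySem.List.pyRange_one_eq_nil (le_refl 0)]
      simp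
    by_cases hN : arr.length < 2
    · rw [PySem.List.pyRange_one_eq_nil (by omega : (arr.length : Int) - 1 ≤ 1)]
      have : arr.length = 0 ∨ arr.length = 1 := by omega
      rcases this with h | h <;> rw [h]
      · rw [PySem.List.pyRange_one_eq_nil (by norm_num)]
      · have h01 : PySem.List.pyRange 0 ((1:Nat):Int) 1 = [0] := by
          have := PySem.List.pyRange_one_singleton (a := 0); simpa using this
        rw [h01]
        simp [hHA0]
    · have hHAend : HA arr ((arr.length : Int) - 1) = 0 := by
        unfold HA HI
        have h1 : ((arr.length : Int) - 1) + 1 = (arr.length : Int) := by ring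
        rw [h1, PySem.List.pyRange_one_eq_nil (le_refl _)]
        simp
      rw [PySem.List.pyRange_one_append 0 1 ((arr.length : Int))
            (by norm_num) (by omega),
          PySem.List.pyRange_one_append 1 ((arr.length : Int) - 1) ((arr.length : Int))
            (by omega) (by omega)]
      have h01 : PySem.List.pyRange 0 1 1 = [0] := by
        have := PySem.List.pyRange_one_singleton (a := 0); simpa using this
      have hend : PySem.List.pyRange ((arr.length : Int) - 1) ((arr.length : Int)) 1 = [(arr.length : Int) - 1] := by
        have := PySem.List.pyRange_one_singleton (a := (arr.length : Int) - 1)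
        rw [show (arr.length : Int) - 1 + 1 = (arr.length : Int) by ring] at this
        exact this
      rw [h01, hend]
      simp only [List.map_append, List.sum_append, List.map_cons, List.map_nil, List.sum_cons, List.sum_nil]
      rw [hHA0]
      rw [hHAend]
      ring
  rw [hfull, PySem.List.pyRange_one, List.map_map]
  have hlen : ((arr.length : Int) - 0).toNat = arr.length := by omega
  rw [hlen, sum_map_range_cast]
  refine Finset.sum_congr rfl ?_
  intro j hj
  simp only [Function.comp_def, zero_add]
  exact HA_eq arr j

lemma tri (n : Nat) (g : Nat → Nat → Int) :
    ∑ x ∈ Finset.range n, ∑ y ∈ Finset.Ico (x+1) n, g x y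
    = ∑ y ∈ Finset.range n, ∑ x ∈ Finset.range y, g x y := by
  have h1 : ∀ x : Nat, Finset.Ico (x+1) n = (Finset.range n).filter (fun y => x < y) := by
    intro x; ext y; simp [Finset.mem_Ico, Finset.mem_filter, Finset.mem_range]; omega
  have h2 : ∀ y : Nat, y < n → Finset.range y = (Finset.range n).filter (fun x => x < y) := by
    intro y hy; ext x; simp [Finset.mem_filter, Finset.mem_range]; omega
  calc ∑ x ∈ Finset.range n, ∑ y ∈ Finset.Ico (x+1) n, g x y
      = ∑ x ∈ Finset.range n, ∑ y ∈ Finset.range n, if x < y then g x y else 0 := by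
        refine Finset.sum_congr rfl ?_
        intro x hx
        rw [h1 x, Finset.sum_filter]
    _ = ∑ y ∈ Finset.range n, ∑ x ∈ Finset.range n, if x < y then g x y else 0 := Finset.sum_comm
    _ = ∑ y ∈ Finset.range n, ∑ x ∈ Finset.range y, g x y := by
        refine Finset.sum_congr rfl ?_
        intro y hy
        rw [h2 y (Finset.mem_range.mp hy), Finset.sum_filter]

lemma AB_eq (arr : List Int) :
    count_triplets_compressed_optimized arr = count_triplets_compressed_optimized_alt arr := by
  rw [LA2, LB3]
  have hswap : ∀ j ∈ Finset.range arr.length,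
      (∑ i ∈ Finset.range j, ∑ k ∈ Finset.Ico (j+1) arr.length, F arr i j k)
      = ∑ k ∈ Finset.Ico (j+1) arr.length, ∑ i ∈ Finset.range j, F arr i j k := by
    intro j _
    exact Finset.sum_comm
  rw [Finset.sum_congr rfl hswap]
  exact tri arr.length (fun j k => ∑ i ∈ Finset.range j, F arr i j k)

-- ===== VERDICT (by name: the statement is the Claim_ definition above) =====
theorem count_triplets_compressed_optimized_spec : Claim_equal_count_triplets_compressed_optimized := by
  intro arr _
  unfold Spec_count_triplets_compressed_optimized
  exact AB_eq arr
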